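-- pv_equiv track=rewrite | github.com/lawRossi/ner | ner/conversion.py | ann2conll
-- ===== SOURCE A (Python) =====
-- def ann2conll(text, anns):
--     annotation = ['O'] * len(text)
--     prev_start = -1
--     prev_end = -1
--     for ann in anns:
--         splits = ann.split('\t')
--         [_type, start, end] = splits[1].split(" ")
--         start = int(start)
--         end = int(end)
--         if prev_start <= start and end <= prev_end:  # overlap
--             continue
--         annotation[start] = 'B_%s' % _type
--         for i in range(start + 1, end - 1):
--             annotation[i] = 'I_%s' % _type
--         annotation[end - 1] = 'E_%s' % _type
--         prev_start = start
--         prev_end = end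
--     return annotation
-- ===== SOURCE B (Python) =====
-- def ann2conll(text, anns):
--     # filter pass: drop a span contained in the previously kept one
--     accepted = []
--     prev_start = -1
--     prev_end = -1
--     for ann in anns:
--         _type, start, end = ann.split('\t')[1].split(' ')
--         start = int(start)
--         end = int(end)
--         if prev_start <= start and end <= prev_end:
--             continue
--         accepted.append((_type, start, end))
--         prev_start = start
--         prev_end = end
--
--     def label_at(i):
--         # the most recently kept span covering i determines the label
--         for _type, s, e in reversed(accepted):
--             if s <= i < e:
--                 if i == e - 1:
--                     return 'E_%s' % _type
--                 if i == s:
--                     return 'B_%s' % _type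
--                 return 'I_%s' % _type
--         return 'O'
--
--     return [label_at(i) for i in range(len(text))]
-- ===== Notes on version B (the rewrite author's own statement) =====
-- stated objective: alternative
-- what changed: A paints labels into a mutable array span by span (three kinds of writes per span, later spans overwriting earlier ones); B never mutates an array: it first computes the accepted-span list, then derives each character's label functionally by scanning the accepted spans in reverse for the most recent span covering that position and applying the E/B/I position rule, so each output cell is computed exactly once by lookup instead of by overwriting writes.
-- outside the precondition, e.g. on ann2conll('abc', ['x\tT 1 1']): A returns ['E_T', 'B_T', 'O'], B returns ['O', 'O', 'O']; on ann2conll('abc', ['x\tT 2 1']): A returns ['E_T', 'O', 'B_T'], B returns ['O', 'O', 'O']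
import Mathlib
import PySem

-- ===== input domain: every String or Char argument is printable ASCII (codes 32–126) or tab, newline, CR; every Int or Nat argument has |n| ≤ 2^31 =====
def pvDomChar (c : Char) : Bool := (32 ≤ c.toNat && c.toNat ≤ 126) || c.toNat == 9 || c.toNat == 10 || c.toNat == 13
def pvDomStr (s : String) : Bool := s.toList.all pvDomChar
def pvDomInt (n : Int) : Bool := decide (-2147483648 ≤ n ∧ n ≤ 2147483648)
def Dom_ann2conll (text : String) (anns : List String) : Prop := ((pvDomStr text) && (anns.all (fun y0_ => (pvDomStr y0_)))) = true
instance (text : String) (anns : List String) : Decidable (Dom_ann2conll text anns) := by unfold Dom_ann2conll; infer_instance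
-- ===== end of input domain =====

-- B replaces A's span-by-span painting into a mutable array by a functional per-character
-- lookup: the label of position i is determined by the most recently accepted span covering
-- i; same return value on Pre_ (well-formed annotations, 0 ≤ start < end ≤ len(text)).
-- Objective: alternative (no speed claim).

-- shared parsing helper: `ann.split('\t')[1].split(' ')` destructured into 3 parts, int() applied
-- (both Pythons perform exactly these lines; none = the line raises)
def parseAnn (ann : String) : Option (String × Int × Int) :=
  (PySem.Str.split? ann "\t").bind fun splits =>
    (PySem.List.pyGet? splits 1).bind fun fld =>
      (PySem.Str.split? fld " ").bind fun parts =>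
        match parts with
        | [t, s, e] =>
            (PySem.Int.ofStr? s).bind fun a =>
              (PySem.Int.ofStr? e).bind fun b => some (t, a, b)
        | _ => none

-- ===== PORT A =====
-- loop body of A: state = (annotation, prev_start, prev_end)
def annStepA (st : Option (List String × Int × Int)) (ann : String) :
    Option (List String × Int × Int) :=
  st.bind fun s =>
    (parseAnn ann).bind fun p =>
      if s.2.1 ≤ p.2.1 ∧ p.2.2 ≤ s.2.2 then some s   -- overlap: continue
      else
        (PySem.List.pySet? s.1 p.2.1 ("B_" ++ p.1)).bind fun a1 =>
          ((PySem.List.pyRange (p.2.1 + 1) (p.2.2 - 1)).foldl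
              (fun acc i => acc.bind fun xs => PySem.List.pySet? xs i ("I_" ++ p.1))
              (some a1)).bind fun a2 =>
            (PySem.List.pySet? a2 (p.2.2 - 1) ("E_" ++ p.1)).bind fun a3 =>
              some (a3, p.2.1, p.2.2)

def ann2conll (text : String) (anns : List String) : List String :=
  ((anns.foldl annStepA (some (List.replicate text.toList.length "O", -1, -1))).map (·.1)).getD []

-- ===== PORT B =====
-- B's filter pass: collect the accepted spans; state = (accepted, prev_start, prev_end)
def collectSpan (st : Option (List (String × Int × Int) × Int × Int)) (ann : String) :
    Option (List (String × Int × Int) × Int × Int) :=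
  st.bind fun s =>
    (parseAnn ann).bind fun p =>
      if s.2.1 ≤ p.2.1 ∧ p.2.2 ≤ s.2.2 then some s
      else some (s.1 ++ [p], p.2.1, p.2.2)

-- B's label_at: scan reversed(accepted) for the first span covering i, apply the E/B/I rule
def findLabel : List (String × Int × Int) → Int → String
  | [], _ => "O"
  | p :: rest, i =>
      if p.2.1 ≤ i ∧ i < p.2.2 then
        if i = p.2.2 - 1 then "E_" ++ p.1
        else if i = p.2.1 then "B_" ++ p.1
        else "I_" ++ p.1
      else findLabel rest i

def ann2conll_alt (text : String) (anns : List String) : List String :=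
  match anns.foldl collectSpan (some ([], -1, -1)) with
  | none => []   -- a parse line raised in Python; outside Pre_
  | some st =>
      (List.range text.toList.length).map (fun (i : Nat) => findLabel st.1.reverse (i : Int))

-- ===== PRECONDITION & SPEC =====
-- one annotation is well formed for a text of length n
def annOK (n : Nat) (ann : String) : Bool :=
  match parseAnn ann with
  | some p => decide (0 ≤ p.2.1 ∧ p.2.1 < p.2.2 ∧ p.2.2 ≤ (n : Int))
  | none => false

-- Pre_ restricts to the natural domain: every annotation parses and names a span with
-- 0 ≤ start < end ≤ len(text).  Outside it A either raises, or (for empty/inverted spans)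
-- returns labels produced by out-of-order negative-index writes — an artefact of A's
-- painting that no per-character reading can share.
def Pre_ann2conll (text : String) (anns : List String) : Prop :=
  ∀ ann ∈ anns, annOK text.toList.length ann = true
instance (text : String) (anns : List String) : Decidable (Pre_ann2conll text anns) := by
  unfold Pre_ann2conll; infer_instance

def pvWitness_ann2conll : String × List String := ("abcde", ["T1\tPER 0 2", "T2\tLOC 3 4"])

def Spec_ann2conll (text : String) (anns : List String) (out : List String) : Prop :=
  out = ann2conll_alt text anns
instance (text : String) (anns : List String) (out : List String) :
    Decidable (Spec_ann2conll text anns out) := by unfold Spec_ann2conll; infer_instance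

-- ===== CLAIM (what is proved, stated in full; the proofs are below) =====
def Claim_equal_ann2conll : Prop := ∀ (text : String) (anns : List String),
  Dom_ann2conll text anns → Pre_ann2conll text anns →
    Spec_ann2conll text anns (ann2conll text anns)

-- ===== LEMMAS AND PROOFS =====

-- the list B produces for a given accepted-span list
def rangeMap (n : Nat) (spans : List (String × Int × Int)) : List String :=
  (List.range n).map (fun (i : Nat) => findLabel spans.reverse (i : Int))

lemma rangeMap_length (n : Nat) (spans : List (String × Int × Int)) :
    (rangeMap n spans).length = n := by simp [rangeMap]

lemma rangeMap_getElem (n : Nat) (spans : List (String × Int × Int)) (i : Nat) (hi : i < n) :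
    (rangeMap n spans)[i]'(by simp [rangeMap]; omega) = findLabel spans.reverse (i : Int) := by
  unfold rangeMap
  rw [List.getElem_map, List.getElem_range]

lemma rangeMap_nil (n : Nat) : rangeMap n [] = List.replicate n "O" := by
  apply List.ext_getElem
  · simp [rangeMap]
  · intro i h1 h2
    rw [rangeMap_getElem n [] i (by simpa [rangeMap] using h1)]
    simp [findLabel]

lemma pySet?_of_lt {α : Type} (xs : List α) (i : Int) (v : α) (h0 : 0 ≤ i)
    (h1 : i < xs.length) : PySem.List.pySet? xs i v = some (xs.set i.toNat v) := by
  simp [PySem.List.pySet?, PySem.List.pyIdx?, h0, h1]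

lemma foldl_set_range {α : Type} (v : α) :
    ∀ (m : Nat) (a b : Int) (l : List α), 0 ≤ a → a ≤ b → b ≤ l.length → (b - a).toNat = m →
      (PySem.List.pyRange a b).foldl
          (fun acc i => acc.bind fun xs => PySem.List.pySet? xs i v) (some l)
        = some (l.take a.toNat ++ List.replicate m v ++ l.drop b.toNat) := by
  intro m
  induction m with
  | zero =>
    intro a b l h0 hab hb hm
    have hba : b = a := by omega
    rw [hba]
    have hnil : PySem.List.pyRange a a = [] := by simp [PySem.List.pyRange]
    simp [hnil, List.take_append_drop]
  | succ k ih =>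
    intro a b l h0 hab hb hm
    have hlt : a < b := by omega
    rw [PySem.List.pyRange_one_cons hlt, List.foldl_cons]
    have hset : PySem.List.pySet? l a v = some (l.set a.toNat v) := by
      apply pySet?_of_lt _ _ _ h0; omega
    simp only [Option.bind_some, hset]
    rw [ih (a + 1) b (l.set a.toNat v) (by omega) (by omega) (by simpa using hb) (by omega)]
    congr 1
    apply List.ext_getElem
    · simp; omega
    · intro i hi1 hi2
      simp only [List.length_append, List.length_take, List.length_set,
        List.length_replicate, List.length_drop] at hi1 hi2
      simp only [List.getElem_append, List.length_append, List.length_take, List.length_set,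
        List.length_replicate, List.length_drop, List.getElem_take, List.getElem_set,
        List.getElem_replicate, List.getElem_drop]
      split_ifs <;> first | rfl | omega | (congr 1; omega)

-- painting one valid span onto B's functional list gives B's functional list for the
-- extended accepted-span list
lemma stepA_eq (n : Nat) (spans : List (String × Int × Int)) (t : String) (a b ps pe : Int)
    (h0 : 0 ≤ a) (hab : a < b) (hb : b ≤ (n : Int)) (ann : String)
    (hp : parseAnn ann = some (t, a, b)) (hov : ¬ (ps ≤ a ∧ b ≤ pe)) :
    annStepA (some (rangeMap n spans, ps, pe)) ann
      = some (rangeMap n (spans ++ [(t, a, b)]), a, b) := by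
  have hlen : (rangeMap n spans).length = n := rangeMap_length n spans
  simp only [annStepA, Option.bind_some, hp]
  rw [if_neg hov]
  rw [pySet?_of_lt _ a _ h0 (by rw [hlen]; omega)]
  simp only [Option.bind_some]
  have key : ∀ (j : Nat) (hj : j < (rangeMap n spans).length) (i : Nat), j = i → i < n →
      (rangeMap n spans)[j]'hj = findLabel spans.reverse (i : Int) := by
    intro j hj i hji hi; subst hji; exact rangeMap_getElem n spans j (by omega)
  have hext : ∀ (l2 : List String) (hl2 : l2.length = n),
      (∀ i : Nat, (hi : i < n) →
        l2[i]'(by omega) = findLabel ((t, a, b) :: spans.reverse) (i : Int)) →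
      l2 = rangeMap n (spans ++ [(t, a, b)]) := by
    intro l2 hl2 hpt
    apply List.ext_getElem
    · rw [hl2, rangeMap_length]
    · intro i h1 h2
      rw [rangeMap_getElem n _ i (by omega), List.reverse_append]
      simpa using hpt i (by omega)
  by_cases hm : a + 1 ≤ b - 1
  · rw [foldl_set_range ("I_" ++ t) (b - 1 - (a + 1)).toNat (a + 1) (b - 1)
        ((rangeMap n spans).set a.toNat ("B_" ++ t)) (by omega) hm (by simp [hlen]; omega) rfl]
    simp only [Option.bind_some]
    rw [pySet?_of_lt _ (b - 1) _ (by omega) (by simp [hlen]; omega)]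
    simp only [Option.bind_some]
    congr 2
    refine hext _ (by simp [hlen]; omega) ?_
    intro i hi
    simp only [List.getElem_set, List.getElem_append, List.length_append, List.length_take,
      List.length_set, List.length_replicate, List.length_drop, List.getElem_take,
      List.getElem_replicate, List.getElem_drop, hlen, findLabel]
    split_ifs <;>
      first | rfl | omega | (exact key _ _ i (by omega) hi)
  · have hba : b = a + 1 := by omega
    have hnil : PySem.List.pyRange (a + 1) (b - 1) = [] := by
      simp [PySem.List.pyRange]; omega
    rw [hnil]
    simp only [List.foldl_nil, Option.bind_some]
    rw [pySet?_of_lt _ (b - 1) _ (by omega) (by rw [List.length_set, hlen]; omega)]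
    simp only [Option.bind_some]
    congr 2
    refine hext _ (by simp [hlen]) ?_
    intro i hi
    simp only [List.getElem_set, hlen, findLabel]
    split_ifs <;>
      first | rfl | omega | (exact key _ _ i (by omega) hi)

lemma annOK_parse (n : Nat) (ann : String) (h : annOK n ann = true) :
    ∃ t a b, parseAnn ann = some (t, a, b) ∧ 0 ≤ a ∧ a < b ∧ b ≤ (n : Int) := by
  unfold annOK at h
  cases hp : parseAnn ann with
  | none => rw [hp] at h; simp at h
  | some p =>
    obtain ⟨t, a, b⟩ := p
    rw [hp] at h
    simp at h
    exact ⟨t, a, b, rfl, h.1, h.2.1, h.2.2⟩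

lemma main_lemma (n : Nat) :
    ∀ (anns : List String), (∀ ann ∈ anns, annOK n ann = true) →
      ∀ (spans : List (String × Int × Int)) (ps pe : Int),
        anns.foldl annStepA (some (rangeMap n spans, ps, pe))
          = (anns.foldl collectSpan (some (spans, ps, pe))).map
              (fun st => (rangeMap n st.1, st.2)) := by
  intro anns
  induction anns with
  | nil => intro _ spans ps pe; simp
  | cons ann rest ih =>
    intro hP spans ps pe
    obtain ⟨t, a, b, hp, ha0, hab, hbn⟩ := annOK_parse n ann (hP ann (List.mem_cons_self))
    have hPrest : ∀ x ∈ rest, annOK n x = true := fun x hx => hP x (List.mem_cons_of_mem _ hx)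
    simp only [List.foldl_cons]
    by_cases hov : ps ≤ a ∧ b ≤ pe
    · have h1 : annStepA (some (rangeMap n spans, ps, pe)) ann
          = some (rangeMap n spans, ps, pe) := by simp [annStepA, hp, hov]
      have h2 : collectSpan (some (spans, ps, pe)) ann = some (spans, ps, pe) := by
        simp [collectSpan, hp, hov]
      rw [h1, h2]
      exact ih hPrest spans ps pe
    · have h1 := stepA_eq n spans t a b ps pe ha0 hab hbn ann hp hov
      have h2 : collectSpan (some (spans, ps, pe)) ann
          = some (spans ++ [(t, a, b)], a, b) := by simp [collectSpan, hp, hov]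
      rw [h1, h2]
      exact ih hPrest (spans ++ [(t, a, b)]) a b

-- ===== VERDICT (by name: the statement is the Claim_ definition above) =====
theorem ann2conll_spec : Claim_equal_ann2conll := by
  intro text anns _ hpre
  unfold Spec_ann2conll ann2conll ann2conll_alt
  have h := main_lemma text.toList.length anns hpre [] (-1) (-1)
  rw [← rangeMap_nil text.toList.length, h]
  cases hc : anns.foldl collectSpan (some ([], -1, -1)) with
  | none => rfl
  | some st => simp [rangeMap]
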